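-- pv_equiv track=rewrite | github.com/alansouls/CodigoMetodos | python/newtonPol.py | valorPol
-- ===== SOURCE A (Python) =====
-- def valorPol(coef,x):
--     b = [coef[0]]
--     c = [b[0]]
--     for i in range(1,len(coef)):
--         b.append(coef[i] + b[i-1]*x)
--     for i in range(1,len(coef)-1):
--         c.append(b[i] + c[i-1]*x)
--     return b[-1],c[-1]
-- ===== SOURCE B (Python) =====
-- def valorPol(coef, x):
--     # Direct power-sum evaluation: P(x) = sum c_i x**e and P'(x) = sum e*c_i*x**(e-1),
--     # with exponents ascending over the reversed coefficient list (no Horner recurrence).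
--     r = coef[::-1]
--     val = sum(c * x ** e for e, c in enumerate(r))
--     der = sum(e * c * x ** (e - 1) for e, c in enumerate(r) if e >= 1)
--     return val, der
-- ===== Notes on version B (the rewrite author's own statement) =====
-- stated objective: alternative
-- what changed: Replaces A's two Horner-recurrence list-building passes by direct closed-form power sums: the value as sum(c*x**e) and the derivative as sum(e*c*x**(e-1)) over the reversed coefficient list, with no recurrence and no b/c arrays.
-- intended difference: On single-coefficient inputs [c0] with c0 != 0, A returns (c0, c0) while B returns (c0, 0); the derivative of a constant polynomial is 0, so B's value is the intended one (A's c0 is leftover loop state from c = [b[0]]). — e.g. on valorPol([5], 2): A returns (5, 5), B returns (5, 0)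
import Mathlib
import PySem

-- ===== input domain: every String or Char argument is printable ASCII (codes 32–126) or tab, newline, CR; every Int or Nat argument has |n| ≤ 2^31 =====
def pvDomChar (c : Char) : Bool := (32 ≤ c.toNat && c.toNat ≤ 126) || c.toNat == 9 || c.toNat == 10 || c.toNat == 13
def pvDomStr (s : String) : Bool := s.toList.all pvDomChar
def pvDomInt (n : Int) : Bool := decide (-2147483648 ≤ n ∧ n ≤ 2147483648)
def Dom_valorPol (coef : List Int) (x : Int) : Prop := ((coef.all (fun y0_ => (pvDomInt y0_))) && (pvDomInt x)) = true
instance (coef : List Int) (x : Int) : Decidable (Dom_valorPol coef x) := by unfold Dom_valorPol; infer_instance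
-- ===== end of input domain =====

-- B replaces A's two Horner-recurrence list-building passes by direct closed-form power
-- sums (value = Σ c·xᵉ, derivative = Σ e·c·xᵉ⁻¹ over the reversed coefficients); B also
-- returns the intended derivative 0 for a constant polynomial where A returns coef[0].

-- ===== PORT A =====
-- literal port of A: build list b (Horner values) by an index loop, then list c by a
-- second index loop reading b, and return (b[-1], c[-1])
def valorPol (coef : List Int) (x : Int) : Int × Int :=
  let b0 : List Int := [PySem.List.pyGetD coef 0 0]
  let b : List Int := (PySem.List.pyRange 1 (coef.length : Int) 1).foldl
      (fun b i => b ++ [PySem.List.pyGetD coef i 0 + PySem.List.pyGetD b (i - 1) 0 * x]) b0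
  let c0 : List Int := [PySem.List.pyGetD b0 0 0]
  let c : List Int := (PySem.List.pyRange 1 ((coef.length : Int) - 1) 1).foldl
      (fun c i => c ++ [PySem.List.pyGetD b i 0 + PySem.List.pyGetD c (i - 1) 0 * x]) c0
  (PySem.List.pyGetD b (-1) 0, PySem.List.pyGetD c (-1) 0)

-- ===== PORT B =====
-- sum(c * x**e for e, c in enumerate(r)): structural recursion carrying the index e.
-- Every exponent e is a nonnegative int in Source B, so Nat exponentiation is exact here.
def pvValSum (x : Int) (e : Nat) : List Int → Int
  | [] => 0
  | c :: cs => c * x ^ e + pvValSum x (e + 1) cs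

-- sum(e * c * x**(e-1) for e, c in enumerate(r) if e >= 1): same recursion with the filter
def pvDerSum (x : Int) (e : Nat) : List Int → Int
  | [] => 0
  | c :: cs => (if 1 ≤ e then (e : Int) * c * x ^ (e - 1) else 0) + pvDerSum x (e + 1) cs

-- literal port of B: r = coef[::-1] (list reversal), then the two power sums
def valorPol_alt (coef : List Int) (x : Int) : Int × Int :=
  let r : List Int := coef.reverse
  (pvValSum x 0 r, pvDerSum x 0 r)

-- ===== PRECONDITION & SPEC =====
-- A raises IndexError (coef[0]) on the empty list, so Pre_ excludes exactly coef = [].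
def Pre_valorPol (coef : List Int) (x : Int) : Prop := coef ≠ []
instance (coef : List Int) (x : Int) : Decidable (Pre_valorPol coef x) := by
  unfold Pre_valorPol; infer_instance
def pvWitness_valorPol : List Int × Int := ([2, -3, 5], 4)

-- On single-coefficient inputs [c0] with c0 ≠ 0, A returns (c0, c0) while B returns
-- (c0, 0); the derivative of a constant polynomial is 0, so B's value is the intended one
-- (A's c0 is leftover state from c = [b[0]]).
def D_valorPol (coef : List Int) (x : Int) : Prop := coef.length = 1 ∧ coef.headD 0 ≠ 0
instance (coef : List Int) (x : Int) : Decidable (D_valorPol coef x) := by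
  unfold D_valorPol; infer_instance

def Spec_valorPol (coef : List Int) (x : Int) (out : Int × Int) : Prop :=
  ¬ D_valorPol coef x → out = valorPol_alt coef x
instance (coef : List Int) (x : Int) (out : Int × Int) : Decidable (Spec_valorPol coef x out) := by
  unfold Spec_valorPol; infer_instance

def pvDiffWitness_valorPol : List Int × Int := ([5], 2)
def pvDiffWitnessOut_valorPol : (Int × Int) × (Int × Int) := ((5, 5), (5, 0))

-- ===== CLAIM (what is proved, stated in full; the proofs are below) =====
def Claim_unchanged_valorPol : Prop := ∀ (coef : List Int) (x : Int), Dom_valorPol coef x → Pre_valorPol coef x → Spec_valorPol coef x (valorPol coef x)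
def Claim_changed_valorPol : Prop := Dom_valorPol (pvDiffWitness_valorPol.1) (pvDiffWitness_valorPol.2) ∧ Pre_valorPol (pvDiffWitness_valorPol.1) (pvDiffWitness_valorPol.2) ∧ D_valorPol (pvDiffWitness_valorPol.1) (pvDiffWitness_valorPol.2) ∧ valorPol (pvDiffWitness_valorPol.1) (pvDiffWitness_valorPol.2) = pvDiffWitnessOut_valorPol.1 ∧ valorPol_alt (pvDiffWitness_valorPol.1) (pvDiffWitness_valorPol.2) = pvDiffWitnessOut_valorPol.2 ∧ pvDiffWitnessOut_valorPol.1 ≠ pvDiffWitnessOut_valorPol.2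
def Claim_exact_valorPol : Prop := ∀ (coef : List Int) (x : Int), Dom_valorPol coef x → Pre_valorPol coef x → D_valorPol coef x → valorPol coef x ≠ valorPol_alt coef x

-- ===== LEMMAS AND PROOFS =====

-- list of successive Horner values v_i = coef[i] + v_{i-1}*x, starting after value v
def pvG (x : Int) : Int → List Int → List Int
  | _, [] => []
  | v, c :: cs => (c + v * x) :: pvG x (c + v * x) cs

-- list of successive derivative-pass values d_i = v_i + d_{i-1}*x over a value list
def pvH (x : Int) : Int → List Int → List Int
  | _, [] => []
  | d, v :: vs => (v + d * x) :: pvH x (v + d * x) vs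

theorem pvG_length (x v : Int) (l : List Int) : (pvG x v l).length = l.length := by
  induction l generalizing v with
  | nil => rfl
  | cons c cs ih => simp [pvG, ih]

theorem pvG_append (x v : Int) (l₁ l₂ : List Int) :
    pvG x v (l₁ ++ l₂) = pvG x v l₁ ++ pvG x ((pvG x v l₁).getLastD v) l₂ := by
  induction l₁ generalizing v with
  | nil => rfl
  | cons c cs ih => simp only [List.cons_append, pvG, List.getLastD_cons, ih]

theorem pvPyGetD_neg_one (xs : List Int) (h : xs ≠ []) :
    PySem.List.pyGetD xs (-1) 0 = xs.getLastD 0 := by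
  obtain ⟨a, l, rfl⟩ := List.exists_cons_of_ne_nil h
  simp [PySem.List.pyGetD, PySem.List.pyGet?, PySem.List.pyIdx?, List.getLastD_eq_getLast?,
    List.getLast?_eq_getElem?]

theorem pvGetD_last (b : List Int) (h : b ≠ []) : b.getD (b.length - 1) 0 = b.getLastD 0 := by
  obtain ⟨a, l, rfl⟩ := List.exists_cons_of_ne_nil h
  simp [List.getD, List.getLastD_eq_getLast?, List.getLast?_eq_getElem?]

-- A's first loop: growing b by appending coef[i] + b[i-1]*x is appending pvG of the rest
theorem pvBloop (coef : List Int) (x : Int) :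
    ∀ (rest b : List Int), b ≠ [] → coef.drop b.length = rest →
    (PySem.List.pyRange (b.length : Int) (coef.length : Int) 1).foldl
      (fun b i => b ++ [PySem.List.pyGetD coef i 0 + PySem.List.pyGetD b (i - 1) 0 * x]) b
    = b ++ pvG x (b.getLastD 0) rest := by
  intro rest
  induction rest with
  | nil =>
      intro b hb hdrop
      have hle : coef.length ≤ b.length := by
        have := congrArg List.length hdrop
        simp at this; omega
      rw [PySem.List.pyRange_one_eq_nil (by exact_mod_cast hle)]
      simp [pvG]
  | cons c cs ih =>
      intro b hb hdrop
      have hlen : (coef.drop b.length).length = cs.length + 1 := by rw [hdrop]; simp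
      have hlt : b.length < coef.length := by simp at hlen; omega
      have hc : PySem.List.pyGetD coef (b.length : Int) 0 = c := by
        rw [PySem.List.pyGetD_natCast]
        have h0 : (coef.drop b.length)[0]? = some c := by rw [hdrop]; rfl
        have : coef[b.length]? = some c := by simpa using h0
        simp [List.getD, this]
      have hblast : PySem.List.pyGetD b ((b.length : Int) - 1) 0 = b.getLastD 0 := by
        have h1 : ((b.length : Int) - 1) = ((b.length - 1 : Nat) : Int) := by
          have : 1 ≤ b.length := List.length_pos_of_ne_nil hb
          omega
        rw [h1, PySem.List.pyGetD_natCast, pvGetD_last b hb]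
      rw [PySem.List.pyRange_one_cons (by exact_mod_cast hlt)]
      simp only [List.foldl_cons]
      set y : Int := c + b.getLastD 0 * x with hy
      have hstep : b ++ [PySem.List.pyGetD coef (b.length : Int) 0 +
          PySem.List.pyGetD b ((b.length : Int) - 1) 0 * x] = b ++ [y] := by rw [hc, hblast]
      rw [hstep]
      have hlen' : ((b.length : Int) + 1) = (((b ++ [y]).length : Nat) : Int) := by
        simp
      rw [hlen']
      have hdrop' : coef.drop (b ++ [y]).length = cs := by
        have : (b ++ [y]).length = b.length + 1 := by simp
        rw [this, ← List.drop_drop, hdrop]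
        rfl
      rw [ih (b ++ [y]) (by simp) hdrop']
      simp [pvG, hy, List.getLastD_eq_getLast?]

-- A's second loop: growing c by appending W[i] + c[i-1]*x is appending pvH over the read
-- portion w of the fixed list W
theorem pvCloop (W : List Int) (x : Int) :
    ∀ (w c t : List Int), c ≠ [] → W.drop c.length = w ++ t →
    (PySem.List.pyRange (c.length : Int) ((c.length : Int) + (w.length : Int)) 1).foldl
      (fun c i => c ++ [PySem.List.pyGetD W i 0 + PySem.List.pyGetD c (i - 1) 0 * x]) c
    = c ++ pvH x (c.getLastD 0) w := by
  intro w
  induction w with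
  | nil =>
      intro c t hc hdrop
      rw [show ((c.length : Int) + (([] : List Int).length : Int)) = (c.length : Int) by simp,
        PySem.List.pyRange_one_eq_nil (le_refl _)]
      simp [pvH]
  | cons v vs ih =>
      intro c t hc hdrop
      have hv : PySem.List.pyGetD W (c.length : Int) 0 = v := by
        rw [PySem.List.pyGetD_natCast]
        have h0 : (W.drop c.length)[0]? = some v := by rw [hdrop]; rfl
        have : W[c.length]? = some v := by simpa using h0
        simp [List.getD, this]
      have hclast : PySem.List.pyGetD c ((c.length : Int) - 1) 0 = c.getLastD 0 := by
        have h1 : ((c.length : Int) - 1) = ((c.length - 1 : Nat) : Int) := by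
          have : 1 ≤ c.length := List.length_pos_of_ne_nil hc
          omega
        rw [h1, PySem.List.pyGetD_natCast, pvGetD_last c hc]
      have hlt : (c.length : Int) < (c.length : Int) + ((v :: vs).length : Int) := by
        simp
      rw [PySem.List.pyRange_one_cons hlt]
      simp only [List.foldl_cons]
      set y : Int := v + c.getLastD 0 * x with hy
      have hstep : c ++ [PySem.List.pyGetD W (c.length : Int) 0 +
          PySem.List.pyGetD c ((c.length : Int) - 1) 0 * x] = c ++ [y] := by rw [hv, hclast]
      rw [hstep]
      have hlen' : ((c.length : Int) + 1) = (((c ++ [y]).length : Nat) : Int) := by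
        simp
      have hbound : (c.length : Int) + ((v :: vs).length : Int)
          = ((c ++ [y]).length : Int) + (vs.length : Int) := by
        simp only [List.length_append, List.length_cons, List.length_nil]
        push_cast
        ring
      rw [hlen', hbound]
      have hdrop' : W.drop (c ++ [y]).length = vs ++ t := by
        have : (c ++ [y]).length = c.length + 1 := by simp
        rw [this, ← List.drop_drop, hdrop]
        rfl
      rw [ih (c ++ [y]) t (by simp) hdrop']
      simp [pvH, hy, List.getLastD_eq_getLast?]

-- the fused scalar fold computes the last pvG value and the last pvH value
theorem pvFoldPair (x : Int) :
    ∀ (ms : List Int) (v d : Int),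
    ms.foldl (fun vd ci => (ci + vd.1 * x, (ci + vd.1 * x) + vd.2 * x)) (v, d)
    = ((pvG x v ms).getLastD v, (pvH x d (pvG x v ms)).getLastD d) := by
  intro ms
  induction ms with
  | nil => intro v d; rfl
  | cons c cs ih =>
      intro v d
      simp only [List.foldl_cons, pvG, pvH, List.getLastD_cons]
      exact ih (c + v * x) ((c + v * x) + d * x)

-- A on c0 :: mids ++ [cl] is a final value-only step after the fused fold over mids
theorem pvA_concat (c0 cl x : Int) (mids : List Int) :
    valorPol (c0 :: (mids ++ [cl])) x =
      (cl + (mids.foldl (fun vd ci => (ci + vd.1 * x, (ci + vd.1 * x) + vd.2 * x)) (c0, c0)).1 * x,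
       (mids.foldl (fun vd ci => (ci + vd.1 * x, (ci + vd.1 * x) + vd.2 * x)) (c0, c0)).2) := by
  unfold valorPol
  have hget0 : PySem.List.pyGetD (c0 :: (mids ++ [cl])) 0 0 = c0 := by
    have h0 : (0 : Int) ≤ (mids.length : Int) + 1 := by positivity
    simp [PySem.List.pyGetD, PySem.List.pyGet?, PySem.List.pyIdx?, h0]
  have hget0' : PySem.List.pyGetD [c0] 0 0 = c0 := by
    simp [PySem.List.pyGetD, PySem.List.pyGet?, PySem.List.pyIdx?]
  simp only [hget0, hget0']
  have hb := pvBloop (c0 :: (mids ++ [cl])) x (mids ++ [cl]) [c0] (by simp) (by simp)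
  simp only [List.length_cons, List.length_append, List.length_nil,
    Nat.cast_add, Nat.cast_one, zero_add] at hb ⊢
  rw [hb]
  simp only [show ([c0] : List Int).getLastD 0 = c0 from rfl]
  rw [pvG_append x c0 mids [cl]]
  set V : Int := (pvG x c0 mids).getLastD c0 with hV
  have hsingle : pvG x V [cl] = [cl + V * x] := rfl
  rw [hsingle]
  have hc := pvCloop ([c0] ++ (pvG x c0 mids ++ [cl + V * x])) x (pvG x c0 mids) [c0]
      [cl + V * x] (by simp) (by simp)
  simp only [List.length_cons, List.length_nil, Nat.cast_one, zero_add,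
    pvG_length, show ([c0] : List Int).getLastD 0 = c0 from rfl] at hc
  have ebound : ((mids.length : Int) + 1 + 1 - 1 : Int) = 1 + (mids.length : Int) := by ring
  rw [ebound, hc]
  have h1 : PySem.List.pyGetD ([c0] ++ (pvG x c0 mids ++ [cl + V * x])) (-1) 0
      = cl + V * x := by
    rw [pvPyGetD_neg_one _ (by simp), List.singleton_append, List.getLastD_cons,
      List.getLastD_concat]
  have h2 : PySem.List.pyGetD ([c0] ++ pvH x c0 (pvG x c0 mids)) (-1) 0
      = (pvH x c0 (pvG x c0 mids)).getLastD c0 := by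
    rw [pvPyGetD_neg_one _ (by simp), List.singleton_append, List.getLastD_cons]
  rw [h1, h2, pvFoldPair]

-- shifting the start index of the value sum multiplies it by x
theorem pvValSum_shift (x : Int) (l : List Int) : ∀ e : Nat,
    pvValSum x (e + 1) l = x * pvValSum x e l := by
  induction l with
  | nil => intro e; simp [pvValSum]
  | cons c cs ih =>
      intro e
      simp only [pvValSum, ih (e + 1)]
      rw [pow_succ]
      ring

-- shifting the start index of the derivative sum: d_{e+1} = x·d_e + v_e
theorem pvDerSum_shift (x : Int) (l : List Int) : ∀ e : Nat,
    pvDerSum x (e + 1) l = x * pvDerSum x e l + pvValSum x e l := by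
  induction l with
  | nil => intro e; simp [pvDerSum, pvValSum]
  | cons c cs ih =>
      intro e
      simp only [pvDerSum, pvValSum, ih (e + 1)]
      by_cases he : 1 ≤ e
      · rw [if_pos (by omega), if_pos he]
        simp only [Nat.add_sub_cancel]
        have hx : x ^ e = x * x ^ (e - 1) := by
          conv_lhs => rw [show e = (e - 1) + 1 from by omega]
          rw [pow_succ]
          ring
        rw [hx]
        push_cast
        ring
      · have he0 : e = 0 := by omega
        subst he0
        norm_num
        ring

-- B equals the final-step-after-fused-fold form on every coef = c0 :: mids ++ [cl]
theorem pvB_concat (x c0 : Int) (mids : List Int) : ∀ cl : Int,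
    valorPol_alt (c0 :: (mids ++ [cl])) x =
      (cl + (mids.foldl (fun vd ci => (ci + vd.1 * x, (ci + vd.1 * x) + vd.2 * x)) (c0, c0)).1 * x,
       (mids.foldl (fun vd ci => (ci + vd.1 * x, (ci + vd.1 * x) + vd.2 * x)) (c0, c0)).2) := by
  induction mids using List.reverseRecOn with
  | nil =>
      intro cl
      unfold valorPol_alt
      simp [pvValSum, pvDerSum]
  | append_singleton mids m ih =>
      intro cl
      have hih := ih m
      unfold valorPol_alt at hih ⊢
      simp only [List.foldl_append, List.foldl_cons, List.foldl_nil]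
      have hrev : (c0 :: ((mids ++ [m]) ++ [cl])).reverse
          = cl :: (c0 :: (mids ++ [m])).reverse := by
        simp
      rw [hrev]
      simp only [pvValSum, pvDerSum, pow_zero, mul_one, if_neg (by omega : ¬ (1 ≤ 0)),
        zero_add, pvValSum_shift, pvDerSum_shift]
      have h1 : pvValSum x 0 (c0 :: (mids ++ [m])).reverse
          = (mids.foldl (fun vd ci => (ci + vd.1 * x, (ci + vd.1 * x) + vd.2 * x)) (c0, c0)).1 * x + m := by
        have := congrArg Prod.fst hih
        simp only at this
        rw [this]
        ring
      have h2 : pvDerSum x 0 (c0 :: (mids ++ [m])).reverse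
          = (mids.foldl (fun vd ci => (ci + vd.1 * x, (ci + vd.1 * x) + vd.2 * x)) (c0, c0)).2 := by
        have := congrArg Prod.snd hih
        simpa using this
      rw [h1, h2]
      simp only [Prod.mk.injEq]
      exact ⟨by ring, by ring⟩

-- A on a singleton [c0] returns (c0, c0)
theorem pvA_single (c0 x : Int) : valorPol [c0] x = (c0, c0) := by
  unfold valorPol
  norm_num [PySem.List.pyRange_one_eq_nil, PySem.List.pyGetD, PySem.List.pyGet?,
    PySem.List.pyIdx?]

-- B on a singleton [c0] returns (c0, 0)
theorem pvB_single (c0 x : Int) : valorPol_alt [c0] x = (c0, 0) := by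
  unfold valorPol_alt
  simp [pvValSum, pvDerSum]

-- ===== VERDICT (by name: the statements are the Claim_ definitions above) =====
theorem valorPol_spec : Claim_unchanged_valorPol := by
  intro coef x _ hpre
  unfold Spec_valorPol
  intro hnD
  obtain ⟨c0, rest, rfl⟩ := List.exists_cons_of_ne_nil hpre
  rcases List.eq_nil_or_concat rest with hrest | ⟨mids, cl, rfl⟩
  · subst hrest
    have hc0 : c0 = 0 := by
      by_contra hne
      exact hnD ⟨by simp, by simpa using hne⟩
    subst hc0
    rw [pvA_single, pvB_single]
  · simp only [List.concat_eq_append]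
    rw [pvA_concat, pvB_concat]

theorem valorPol_changed : Claim_changed_valorPol := by
  unfold Claim_changed_valorPol
  refine ⟨by decide, by decide, by decide, ?_, ?_, by decide⟩
  · exact pvA_single 5 2
  · exact pvB_single 5 2

theorem valorPol_tight : Claim_exact_valorPol := by
  intro coef x _ _ hD
  obtain ⟨hlen, hne⟩ := hD
  obtain ⟨c0, rest, rfl⟩ := List.exists_cons_of_ne_nil (by
    intro h; rw [h] at hlen; simp at hlen : coef ≠ [])
  have hrest : rest = [] := by
    simpa using hlen
  subst hrest
  rw [pvA_single, pvB_single]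
  intro h
  exact (by simpa using hne : c0 ≠ 0) (by simpa using congrArg Prod.snd h)
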